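-- pv_equiv track=rewrite | github.com/Wulfic/Cicada3301 | Tools/analyze_166_final.py | manual_segment
-- ===== SOURCE A (Python) =====
-- def manual_segment(text):
--     """Manually segment based on known words"""
--     # Known words in order of position
--     segments = []
--     pos = 0
--
--     # Position 0-1: HF - unclear
--     segments.append(("HF", "?"))
--
--     # Position 2-3: OF
--     # Actually let's just mark found words
--
--     known_words = [
--         (2, "OF"),
--         (7, "ODE"),  # or start of EO-DE-O
--         (11, "MET"),
--         (14, "BID"),
--         (17, "AM"),
--         (22, "ALT"),
--         (25, "THE"),
--         (28, "LONE"),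
--         (34, "HER"),
--         (76, "SAY"),
--     ]
--
--     result = []
--     i = 0
--     while i < len(text):
--         found = False
--         for pos, word in known_words:
--             if i == pos:
--                 result.append(f"[{word}]")
--                 i += len(word)
--                 found = True
--                 break
--         if not found:
--             result.append(text[i])
--             i += 1
--
--     return result
-- ===== SOURCE B (Python) =====
-- KNOWN_WORDS = [
--     (2, "OF"), (7, "ODE"), (11, "MET"), (14, "BID"), (17, "AM"),
--     (22, "ALT"), (25, "THE"), (28, "LONE"), (34, "HER"), (76, "SAY"),
-- ]
--
-- def manual_segment(text):
--     """Single pass over the (sorted, non-overlapping) word list, filling gaps with slices."""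
--     result = []
--     i = 0
--     for pos, word in KNOWN_WORDS:
--         if pos >= len(text):
--             break
--         result.extend(text[i:pos])
--         result.append(f"[{word}]")
--         i = pos + len(word)
--     result.extend(text[i:])
--     return result
-- ===== Notes on version B (the rewrite author's own statement) =====
-- stated objective: faster
-- what changed: Replaces A's per-character outer walk with an inner rescan of the full 10-entry word list at every character by a single pass over the (sorted, non-overlapping) word list that fills the gaps with slices.
import Mathlib
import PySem

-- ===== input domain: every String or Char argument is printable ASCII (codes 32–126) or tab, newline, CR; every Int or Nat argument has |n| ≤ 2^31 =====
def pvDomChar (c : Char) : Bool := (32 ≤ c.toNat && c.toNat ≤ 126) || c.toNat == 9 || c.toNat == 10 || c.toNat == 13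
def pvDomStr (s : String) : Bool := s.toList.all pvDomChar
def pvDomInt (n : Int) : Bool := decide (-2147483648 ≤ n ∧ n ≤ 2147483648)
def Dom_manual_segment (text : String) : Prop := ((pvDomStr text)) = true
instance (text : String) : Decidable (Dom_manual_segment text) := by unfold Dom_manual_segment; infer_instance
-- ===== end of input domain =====

-- B replaces A's per-character walk (with an inner rescan of the word list each step)
-- by one pass over the sorted word list, filling gaps with slices (measured faster at large n).

-- ===== PORT A =====
def pvKnownWords : List (Nat × String) :=
  [(2, "OF"), (7, "ODE"), (11, "MET"), (14, "BID"), (17, "AM"),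
   (22, "ALT"), (25, "THE"), (28, "LONE"), (34, "HER"), (76, "SAY")]

-- A's inner `for pos, word in known_words: if i == pos: … break` scan
def pvFindWord (i : Nat) : List (Nat × String) → Option String
  | [] => none
  | (pos, w) :: rest => if i = pos then some w else pvFindWord i rest

-- every word found is one of the ten literals, all nonempty (used for termination)
theorem pvFindWord_pos (i : Nat) (w : String)
    (h : pvFindWord i pvKnownWords = some w) : 0 < w.toList.length := by
  have aux : ∀ (l : List (Nat × String)), (∀ p ∈ l, 0 < p.2.toList.length) →
      pvFindWord i l = some w → 0 < w.toList.length := by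
    intro l
    induction l with
    | nil => intro _ h'; simp [pvFindWord] at h'
    | cons p rest ih =>
      intro hall h'
      simp only [pvFindWord] at h'
      split at h'
      · cases h'; exact hall p (by simp)
      · exact ih (fun q hq => hall q (by simp [hq])) h'
  exact aux pvKnownWords (by decide) h

-- A's `while i < len(text)` loop
def pvALoop (cs : List Char) (i : Nat) : List String :=
  if h : i < cs.length then
    match hf : pvFindWord i pvKnownWords with
    | some w => ("[" ++ w ++ "]") :: pvALoop cs (i + w.toList.length)
    | none => String.ofList [cs[i]] :: pvALoop cs (i + 1)
  else []
termination_by cs.length - i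
decreasing_by
· have := pvFindWord_pos i w hf; omega
· omega

def manual_segment (text : String) : List String := pvALoop text.toList 0

-- ===== PORT B =====
-- B's `for pos, word in KNOWN_WORDS` loop (with `break`), then the tail slice
def pvBLoop (cs : List Char) (i : Nat) : List (Nat × String) → List String
  | [] => (cs.drop i).map (fun c => String.ofList [c])
  | (pos, w) :: rest =>
    if cs.length ≤ pos then (cs.drop i).map (fun c => String.ofList [c])
    else ((cs.drop i).take (pos - i)).map (fun c => String.ofList [c])
          ++ ("[" ++ w ++ "]") :: pvBLoop cs (pos + w.toList.length) rest

def manual_segment_alt (text : String) : List String := pvBLoop text.toList 0 pvKnownWords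

-- ===== PRECONDITION & SPEC =====
def Spec_manual_segment (text : String) (out : List String) : Prop := out = manual_segment_alt text
instance (text : String) (out : List String) : Decidable (Spec_manual_segment text out) := by unfold Spec_manual_segment; infer_instance

-- ===== CLAIM (what is proved, stated in full; the proofs are below) =====
def Claim_equal_manual_segment : Prop := ∀ (text : String), Dom_manual_segment text → Spec_manual_segment text (manual_segment text)

-- ===== LEMMAS AND PROOFS =====

-- the word list is sorted, non-overlapping and its words nonempty, from position i on
def pvSane (i : Nat) : List (Nat × String) → Prop
  | [] => True
  | (pos, w) :: rest => i ≤ pos ∧ 0 < w.toList.length ∧ pvSane (pos + w.toList.length) rest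

theorem pvSane_mono {i j : Nat} {l : List (Nat × String)} (h : pvSane i l) (hij : j ≤ i) :
    pvSane j l := by
  cases l with
  | nil => trivial
  | cons p rest => obtain ⟨h1, h2, h3⟩ := h; exact ⟨le_trans hij h1, h2, h3⟩

theorem pvSane_lb {i : Nat} {l : List (Nat × String)} (h : pvSane i l) :
    ∀ p ∈ l, i ≤ p.1 := by
  induction l generalizing i with
  | nil => intro p hp; simp at hp
  | cons q rest ih =>
    obtain ⟨h1, h2, h3⟩ := h
    intro p hp
    rcases List.mem_cons.mp hp with rfl | hp
    · exact h1
    · exact le_trans (by omega) (ih (pvSane_mono h3 (le_refl _)) p hp)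

-- pvFindWord skips entries whose position differs from i
theorem pvFindWord_append (i : Nat) (pre : List (Nat × String)) {suf : List (Nat × String)}
    (h : ∀ p ∈ pre, p.1 ≠ i) : pvFindWord i (pre ++ suf) = pvFindWord i suf := by
  induction pre with
  | nil => rfl
  | cons q rest ih =>
    have hq : ¬ (i = q.1) := fun he => h q (by simp) he.symm
    simp only [List.cons_append, pvFindWord]
    rw [if_neg hq]
    exact ih (fun p hp => h p (by simp [hp]))

theorem pvFindWord_none (i : Nat) (l : List (Nat × String)) (h : ∀ p ∈ l, p.1 ≠ i) :
    pvFindWord i l = none := by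
  have := pvFindWord_append i l (suf := []) h
  simpa using this

-- If no word position ≥ i is reachable, A just emits the remaining characters.
theorem pvALoop_tail (cs : List Char) (i : Nat)
    (h : ∀ j, i ≤ j → j < cs.length → pvFindWord j pvKnownWords = none) :
    pvALoop cs i = (cs.drop i).map (fun c => String.ofList [c]) := by
  by_cases hi : i < cs.length
  · rw [pvALoop, dif_pos hi]
    have hn := h i (le_refl _) hi
    have htail : pvALoop cs (i + 1) = (cs.drop (i + 1)).map (fun c => String.ofList [c]) :=
      pvALoop_tail cs (i + 1) (fun j hj hj2 => h j (by omega) hj2)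
    split
    · rename_i w hf; rw [hn] at hf; cases hf
    · rw [htail, List.drop_eq_getElem_cons hi, List.map_cons]
  · rw [pvALoop, dif_neg hi, List.drop_eq_nil_of_le (by omega)]
    simp
termination_by cs.length - i

-- Over a gap [i, pos) with no word match, A emits the characters one by one.
theorem pvALoop_gap (cs : List Char) (i pos : Nat) (hip : i ≤ pos) (hpl : pos ≤ cs.length)
    (h : ∀ j, i ≤ j → j < pos → pvFindWord j pvKnownWords = none) :
    pvALoop cs i = ((cs.drop i).take (pos - i)).map (fun c => String.ofList [c]) ++ pvALoop cs pos := by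
  by_cases hi : i < pos
  · have hil : i < cs.length := by omega
    rw [pvALoop, dif_pos hil]
    have hn := h i (le_refl _) hi
    have hrec := pvALoop_gap cs (i + 1) pos (by omega) hpl (fun j hj hj2 => h j (by omega) hj2)
    split
    · rename_i w hf; rw [hn] at hf; cases hf
    · rw [hrec, List.drop_eq_getElem_cons hil]
      have hpi : pos - i = (pos - (i + 1)) + 1 := by omega
      rw [hpi, List.take_succ_cons, List.map_cons, List.cons_append]
  · have : i = pos := by omega
    subst this
    simp
termination_by pos - i

-- Main invariant: with the already-consumed prefix strictly below i and the suffix sane,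
-- A's walk from i equals B's pass over the suffix.
theorem pvMain (cs : List Char) (suf : List (Nat × String)) : ∀ (i : Nat) (pre : List (Nat × String)),
    pvKnownWords = pre ++ suf → (∀ p ∈ pre, p.1 < i) → pvSane i suf →
    pvALoop cs i = pvBLoop cs i suf := by
  induction suf with
  | nil =>
    intro i pre heq hpre _
    rw [pvBLoop]
    exact pvALoop_tail cs i (fun j hj _ => by
      rw [heq, pvFindWord_append j pre (fun p hp => by have := hpre p hp; omega)]
      rfl)
  | cons pw rest ih =>
    intro i pre heq hpre hsane
    obtain ⟨pos, w⟩ := pw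
    obtain ⟨hip, hw, hrest⟩ := hsane
    rw [pvBLoop]
    have hnone : ∀ j, i ≤ j → j < pos → pvFindWord j pvKnownWords = none := by
      intro j hj hj2
      rw [heq]
      rw [pvFindWord_append j pre (fun p hp => by have := hpre p hp; omega)]
      refine pvFindWord_none j _ (fun p hp => ?_)
      rcases List.mem_cons.mp hp with rfl | hp
      · omega
      · have := pvSane_lb hrest p hp; simp at this ⊢; omega
    by_cases hbr : cs.length ≤ pos
    · rw [if_pos hbr]
      exact pvALoop_tail cs i (fun j hj hj2 => by
        by_cases hjp : j < pos
        · exact hnone j hj hjp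
        · rw [heq, pvFindWord_append j pre (fun p hp => by have := hpre p hp; omega)]
          refine pvFindWord_none j _ (fun p hp => ?_)
          rcases List.mem_cons.mp hp with rfl | hp
          · simp; omega
          · have := pvSane_lb hrest p hp; simp at this ⊢; omega)
    · rw [if_neg hbr]
      have hpl : pos < cs.length := by omega
      rw [pvALoop_gap cs i pos hip (by omega) hnone]
      congr 1
      rw [pvALoop, dif_pos hpl]
      have hfind : pvFindWord pos pvKnownWords = some w := by
        rw [heq, pvFindWord_append pos pre (fun p hp => by have := hpre p hp; omega)]
        simp [pvFindWord]
      split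
      · rename_i w' hf
        rw [hfind] at hf
        cases hf
        congr 1
        exact ih (pos + w.toList.length) (pre ++ [(pos, w)])
          (by rw [heq]; simp)
          (by intro p hp
              rcases List.mem_append.mp hp with hp | hp
              · have := hpre p hp; omega
              · have hp' : p = (pos, w) := by simpa using hp
                subst hp'
                show pos < pos + w.toList.length
                omega)
          hrest
      · rename_i hf; rw [hfind] at hf; cases hf

-- ===== VERDICT (by name: the statement is the Claim_ definition above) =====
theorem manual_segment_spec : Claim_equal_manual_segment := by
  intro text _
  unfold Spec_manual_segment manual_segment manual_segment_alt
  exact pvMain text.toList pvKnownWords 0 [] rfl (by simp) (by simp only [pvKnownWords, pvSane]; decide)
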